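-- pv_equiv track=rewrite | github.com/chanchantang/eng-intern-challenge | python/translator.py | convert_braille_to_english
-- ===== SOURCE A (Python) =====
-- braille_to_english_alpha = {
--     "O.....": 'a',
--     "O.O...": 'b',
--     "OO....": 'c',
--     "OO.O..": 'd',
--     "O..O..": 'e',
--     "OOO...": 'f',
--     "OOOO..": 'g',
--     "O.OO..": 'h',
--     ".OO...": 'i',
--     ".OOO..": 'j',
--     "O...O.": 'k',
--     "O.O.O.": 'l',
--     "OO..O.": 'm',
--     "OO.OO.": 'n',
--     "O..OO.": 'o',
--     "OOO.O.": 'p',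
--     "OOOOO.": 'q',
--     "O.OOO.": 'r',
--     ".OO.O.": 's',
--     ".OOOO.": 't',
--     "O...OO": 'u',
--     "O.O.OO": 'v',
--     ".OOO.O": 'w',
--     "OO..OO": 'x',
--     "OO.OOO": 'y',
--     "O..OOO": 'z',
-- }
--
-- braille_to_english_digit = {
--     "O.....": '1',
--     "O.O...": '2',
--     "OO....": '3',
--     "OO.O..": '4',
--     "O..O..": '5',
--     "OOO...": '6',
--     "OOOO..": '7',
--     "O.OO..": '8',
--     ".OO...": '9',
--     ".OOO..": '0',
-- }
--
-- capital_follows = ".....O"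
--
-- number_follows = ".O.OOO"
--
-- space_braille = "......"
--
-- def convert_braille_to_english(input_string):
--     index = 0
--     output = []
--     while index < len(input_string):
--         sub_braille = input_string[index:index+6]
--
--         if sub_braille == number_follows:
--             # a digit sequence
--             index += 6
--             while index < len(input_string):
--                 sub_braille = input_string[index:index+6]
--                 if sub_braille == space_braille:
--                     output.append(' ')
--                     break
--                 else:
--                     output.append(braille_to_english_digit[sub_braille])
--                 index += 6
--
--         elif sub_braille == capital_follows:
--             index += 6
--             sub_braille = input_string[index:index+6]
--             # maybe error check here
--             output.append(braille_to_english_alpha[sub_braille].upper())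
--
--         elif sub_braille == space_braille:
--             output.append(' ')
--
--         else:
--             # error check if not in list
--             output.append(braille_to_english_alpha[sub_braille])
--
--         index += 6
--     return ''.join(output)
-- ===== SOURCE B (Python) =====
-- braille_to_english_alpha = {
--     "O.....": 'a', "O.O...": 'b', "OO....": 'c', "OO.O..": 'd', "O..O..": 'e',
--     "OOO...": 'f', "OOOO..": 'g', "O.OO..": 'h', ".OO...": 'i', ".OOO..": 'j',
--     "O...O.": 'k', "O.O.O.": 'l', "OO..O.": 'm', "OO.OO.": 'n', "O..OO.": 'o',
--     "OOO.O.": 'p', "OOOOO.": 'q', "O.OOO.": 'r', ".OO.O.": 's', ".OOOO.": 't',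
--     "O...OO": 'u', "O.O.OO": 'v', ".OOO.O": 'w', "OO..OO": 'x', "OO.OOO": 'y',
--     "O..OOO": 'z',
-- }
--
-- braille_to_english_digit = {
--     "O.....": '1', "O.O...": '2', "OO....": '3', "OO.O..": '4', "O..O..": '5',
--     "OOO...": '6', "OOOO..": '7', "O.OO..": '8', ".OO...": '9', ".OOO..": '0',
-- }
--
-- capital_follows = ".....O"
-- number_follows = ".O.OOO"
-- space_braille = "......"
--
-- def convert_braille_to_english(input_string):
--     chunks = [input_string[i:i+6] for i in range(0, len(input_string), 6)]
--     out = []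
--     number_mode = False
--     capital_next = False
--     for ch in chunks:
--         if number_mode:
--             if ch == space_braille:
--                 out.append(' ')
--                 number_mode = False
--             else:
--                 out.append(braille_to_english_digit[ch])
--         elif ch == number_follows:
--             number_mode = True
--         elif ch == capital_follows:
--             capital_next = True
--         elif ch == space_braille:
--             out.append(' ')
--         else:
--             c = braille_to_english_alpha[ch]
--             out.append(c.upper() if capital_next else c)
--             capital_next = False
--     return ''.join(out)
-- ===== Notes on version B (the rewrite author's own statement) =====
-- stated objective: simpler
-- what changed: A's index-driven outer while loop with a nested inner while loop for digit runs and an in-branch extra read for capitals is replaced by splitting the input into 6-char chunks once and making a single pass over the chunks with two state flags (number_mode, capital_next).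
import Mathlib
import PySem

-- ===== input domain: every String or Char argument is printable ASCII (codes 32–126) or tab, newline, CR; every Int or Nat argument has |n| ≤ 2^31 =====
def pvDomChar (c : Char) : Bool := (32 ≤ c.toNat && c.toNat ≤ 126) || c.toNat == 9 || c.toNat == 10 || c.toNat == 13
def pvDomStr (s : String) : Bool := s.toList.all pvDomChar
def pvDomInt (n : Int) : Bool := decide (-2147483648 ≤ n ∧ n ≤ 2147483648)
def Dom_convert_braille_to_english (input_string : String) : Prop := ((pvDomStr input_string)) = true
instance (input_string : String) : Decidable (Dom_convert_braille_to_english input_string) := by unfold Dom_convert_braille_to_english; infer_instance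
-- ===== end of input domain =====

-- B replaces A's index-juggling nested while loops by a chunk split followed by ONE flag-driven pass (objective: simpler decomposition, same cost).
-- Pre_ excludes exactly the inputs on which A raises KeyError (malformed braille); no return value of A is excluded.

-- shared module constants (the Python dicts and marker strings), used by both programs
def alphaTable : List (List Char × Char) :=
  [("O.....".toList, 'a'), ("O.O...".toList, 'b'), ("OO....".toList, 'c'),
   ("OO.O..".toList, 'd'), ("O..O..".toList, 'e'), ("OOO...".toList, 'f'),
   ("OOOO..".toList, 'g'), ("O.OO..".toList, 'h'), (".OO...".toList, 'i'),
   (".OOO..".toList, 'j'), ("O...O.".toList, 'k'), ("O.O.O.".toList, 'l'),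
   ("OO..O.".toList, 'm'), ("OO.OO.".toList, 'n'), ("O..OO.".toList, 'o'),
   ("OOO.O.".toList, 'p'), ("OOOOO.".toList, 'q'), ("O.OOO.".toList, 'r'),
   (".OO.O.".toList, 's'), (".OOOO.".toList, 't'), ("O...OO".toList, 'u'),
   ("O.O.OO".toList, 'v'), (".OOO.O".toList, 'w'), ("OO..OO".toList, 'x'),
   ("OO.OOO".toList, 'y'), ("O..OOO".toList, 'z')]

def digitTable : List (List Char × Char) :=
  [("O.....".toList, '1'), ("O.O...".toList, '2'), ("OO....".toList, '3'),
   ("OO.O..".toList, '4'), ("O..O..".toList, '5'), ("OOO...".toList, '6'),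
   ("OOOO..".toList, '7'), ("O.OO..".toList, '8'), (".OO...".toList, '9'),
   (".OOO..".toList, '0')]

-- dict lookup; '?'-default stands in only where Python raises KeyError (excluded by Pre_)
def alpha? (k : List Char) : Option Char := alphaTable.lookup k
def digit? (k : List Char) : Option Char := digitTable.lookup k
def numC : List Char := ".O.OOO".toList
def capC : List Char := ".....O".toList
def spaceC : List Char := "......".toList

-- ===== PORT A =====
-- A walks by an index; 'rest' is input_string[index:], so s[index:index+6] is rest.take 6 and
-- 'index += 6' is rest.drop 6 (Python slice with 0 ≤ index: exact). '.upper()' on the looked-up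
-- lowercase ASCII letter is Char.toUpper (exact on ASCII).
-- inner digit while-loop of A; returns (output, remaining string at the break point)
def aDigits (rest output : List Char) : List Char × List Char :=
  if _h : rest = [] then (output, rest)
  else
    let sub := rest.take 6
    if sub = spaceC then (output ++ [' '], rest)          -- append ' '; break
    else aDigits (rest.drop 6) (output ++ [(digit? sub).getD '?'])
termination_by rest.length
decreasing_by
  have hh : rest.length ≠ 0 := by simp_all
  simp [List.length_drop]; omega

theorem aDigits_snd_le (rest output : List Char) : (aDigits rest output).2.length ≤ rest.length := by
  fun_induction aDigits rest output with
  | case1 => simp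
  | case2 => simp
  | case3 rest output h sub hs ih => simp only [List.length_drop] at ih ⊢; omega

-- outer while-loop of A
def aLoop (rest output : List Char) : List Char :=
  if _h : rest = [] then output
  else
    let sub := rest.take 6
    if sub = numC then
      let p := aDigits (rest.drop 6) output
      aLoop (p.2.drop 6) p.1
    else if sub = capC then
      let sub2 := (rest.drop 6).take 6
      aLoop ((rest.drop 6).drop 6) (output ++ [((alpha? sub2).getD '?').toUpper])
    else if sub = spaceC then aLoop (rest.drop 6) (output ++ [' '])
    else aLoop (rest.drop 6) (output ++ [(alpha? sub).getD '?'])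
termination_by rest.length
decreasing_by
  · have ha := aDigits_snd_le (rest.drop 6) output
    have hh : rest.length ≠ 0 := by simp_all
    simp only [List.length_drop] at ha ⊢; omega
  · have hh : rest.length ≠ 0 := by simp_all
    simp [List.length_drop]; omega
  · have hh : rest.length ≠ 0 := by simp_all
    simp [List.length_drop]; omega
  · have hh : rest.length ≠ 0 := by simp_all
    simp [List.length_drop]; omega

def convert_braille_to_english (input_string : String) : String :=
  String.ofList (aLoop input_string.toList [])

-- ===== PORT B =====
-- port of the chunk comprehension [input_string[i:i+6] for i in range(0, len, 6)]
def chunks6 (l : List Char) : List (List Char) :=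
  if _h : l = [] then [] else l.take 6 :: chunks6 (l.drop 6)
termination_by l.length
decreasing_by have hh : l.length ≠ 0 := by simp_all
              simp [List.length_drop]; omega

-- B's single pass with the two flags
def bLoop (cs : List (List Char)) (numberMode capitalNext : Bool) (out : List Char) : List Char :=
  match cs with
  | [] => out
  | ch :: rest =>
    if numberMode then
      if ch = spaceC then bLoop rest false capitalNext (out ++ [' '])
      else bLoop rest true capitalNext (out ++ [(digit? ch).getD '?'])
    else if ch = numC then bLoop rest true capitalNext out
    else if ch = capC then bLoop rest numberMode true out
    else if ch = spaceC then bLoop rest numberMode capitalNext (out ++ [' '])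
    else
      let c := (alpha? ch).getD '?'
      bLoop rest numberMode false (out ++ [if capitalNext then c.toUpper else c])

def convert_braille_to_english_alt (input_string : String) : String :=
  String.ofList (bLoop (chunks6 input_string.toList) false false [])

-- ===== PRECONDITION & SPEC =====
-- Well-formedness grammar over the 6-char chunks: each chunk is a letter, a space, a capital
-- marker followed by a letter, or a number marker followed by digits up to a space or the end.
-- validM true cs: inside a digit run; validM false cs: at a token boundary
def validM : Bool → List (List Char) → Bool
  | _, [] => true
  | true, ch :: cs => if ch = spaceC then validM false cs else (digit? ch).isSome && validM true cs
  | false, ch :: cs =>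
    if ch = numC then validM true cs
    else if ch = capC then
      match cs with
      | [] => false
      | ch2 :: cs' => (alpha? ch2).isSome && validM false cs'
    else if ch = spaceC then validM false cs
    else (alpha? ch).isSome && validM false cs

-- Pre_ excludes exactly the inputs on which A raises KeyError: a length not a multiple of 6,
-- an unknown chunk, a non-digit before the space after a number marker, or a capital marker not
-- followed by a letter chunk. A returns on every input satisfying Pre_.
-- the i-th 6-character chunk of the input, stated by position (no loop)
def preChunks (l : List Char) : List (List Char) :=
  (List.range (l.length / 6)).map (fun i => (l.drop (6 * i)).take 6)

def Pre_convert_braille_to_english (input_string : String) : Prop :=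
  input_string.toList.length % 6 = 0 ∧ validM false (preChunks input_string.toList) = true
instance (input_string : String) : Decidable (Pre_convert_braille_to_english input_string) := by
  unfold Pre_convert_braille_to_english; infer_instance

def pvWitness_convert_braille_to_english : String := ".....OO.OO...OO..........O.OOOOO.O..O.O..."

def Spec_convert_braille_to_english (input_string : String) (out : String) : Prop :=
  out = convert_braille_to_english_alt input_string
instance (input_string : String) (out : String) : Decidable (Spec_convert_braille_to_english input_string out) := by
  unfold Spec_convert_braille_to_english; infer_instance

-- ===== CLAIM (what is proved, stated in full; the proofs are below) =====
def Claim_equal_convert_braille_to_english : Prop := ∀ (input_string : String), Dom_convert_braille_to_english input_string → Pre_convert_braille_to_english input_string → Spec_convert_braille_to_english input_string (convert_braille_to_english input_string)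

-- ===== LEMMAS AND PROOFS =====

theorem chunks6_cons {l : List Char} (h : l ≠ []) :
    chunks6 l = l.take 6 :: chunks6 (l.drop 6) := by
  rw [chunks6]; simp [h]

theorem preChunks_eq_chunks6 : ∀ n (l : List Char), l.length = n → l.length % 6 = 0 →
    preChunks l = chunks6 l := by
  intro n
  induction n using Nat.strong_induction_on with
  | _ n ih =>
    intro l hn h6
    by_cases hne : l = []
    · subst hne; rw [chunks6]; simp [preChunks]
    · have hlen : l.length ≠ 0 := by simpa using hne
      rw [chunks6_cons hne]
      have hdl : (l.drop 6).length < n := by simp [List.length_drop]; omega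
      have hd6 : (l.drop 6).length % 6 = 0 := by simp [List.length_drop]; omega
      have ihd := ih _ hdl (l.drop 6) rfl hd6
      rw [← ihd]
      unfold preChunks
      have hq : l.length / 6 = (l.drop 6).length / 6 + 1 := by
        simp only [List.length_drop]; omega
      rw [hq, List.range_succ_eq_map, List.map_cons, List.map_map]
      congr 1
      apply List.map_congr_left
      intro i _
      simp only [Function.comp_apply, List.drop_drop]
      congr 2
      omega

theorem alpha?_ne_markers {x : List Char} {c : Char} (h : alpha? x = some c) :
    x ≠ numC ∧ x ≠ capC ∧ x ≠ spaceC := by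
  refine ⟨?_, ?_, ?_⟩ <;> rintro rfl
  · rw [show alpha? numC = none from by decide] at h; simp at h
  · rw [show alpha? capC = none from by decide] at h; simp at h
  · rw [show alpha? spaceC = none from by decide] at h; simp at h

theorem validM_false_cons (ch : List Char) (cs : List (List Char)) :
    validM false (ch :: cs) =
      (if ch = numC then validM true cs
       else if ch = capC then
         (match cs with
          | [] => false
          | ch2 :: cs' => (alpha? ch2).isSome && validM false cs')
       else if ch = spaceC then validM false cs
       else ((alpha? ch).isSome && validM false cs)) := by rw [validM.eq_def]

theorem validM_true_cons (ch : List Char) (cs : List (List Char)) :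
    validM true (ch :: cs) =
      (if ch = spaceC then validM false cs else ((digit? ch).isSome && validM true cs)) := by rw [validM.eq_def]

-- main loop correspondence, mutually with the digit phase, by strong induction on the length
theorem loops_agree : ∀ n : Nat,
    (∀ rest out : List Char, rest.length = n → rest.length % 6 = 0 →
       validM false (chunks6 rest) = true → aLoop rest out = bLoop (chunks6 rest) false false out) ∧
    (∀ rest out : List Char, rest.length = n → rest.length % 6 = 0 →
       validM true (chunks6 rest) = true →
       aLoop ((aDigits rest out).2.drop 6) (aDigits rest out).1 =
         bLoop (chunks6 rest) true false out) := by
  intro n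
  induction n using Nat.strong_induction_on with
  | _ n ih =>
    constructor
    · intro rest out hn h6 hv
      by_cases hne : rest = []
      · subst hne; rw [chunks6]; simp [aLoop, bLoop]
      · have hlen : rest.length ≠ 0 := by simpa using hne
        have hcons := chunks6_cons hne
        rw [hcons] at hv ⊢
        by_cases hnum : rest.take 6 = numC
        · -- number marker
          rw [aLoop]; simp only [dif_neg hne, if_pos hnum]
          rw [bLoop]; simp only [if_neg (by simp : ¬ (false = true)), if_pos hnum]
          have h6' : (rest.drop 6).length % 6 = 0 := by simp [List.length_drop]; omega
          have hlt : (rest.drop 6).length < n := by simp [List.length_drop]; omega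
          have hv' : validM true (chunks6 (rest.drop 6)) = true := by
            rw [validM_false_cons] at hv; simpa [hnum] using hv
          exact (ih _ hlt).2 (rest.drop 6) out rfl h6' hv'
        · by_cases hcap : rest.take 6 = capC
          · -- capital marker: valid forces a letter chunk next
            rw [validM_false_cons] at hv
            simp only [if_neg hnum, if_pos hcap] at hv
            rcases hcs : chunks6 (rest.drop 6) with _ | ⟨ch2, cs'⟩
            · rw [hcs] at hv; simp at hv
            · rw [hcs] at hv
              simp only [Bool.and_eq_true, Option.isSome_iff_exists] at hv
              obtain ⟨⟨c, hc⟩, hv'⟩ := hv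
              have hne' : rest.drop 6 ≠ [] := by
                intro h0; rw [h0] at hcs; rw [chunks6] at hcs; simp at hcs
              have hcons' := chunks6_cons hne'
              rw [hcons'] at hcs
              injection hcs with h1 h2
              subst h1; subst h2
              have hlen6 : 6 ≤ rest.length := by omega
              have hlen6' : 6 < rest.length := by simpa using hne'
              rw [aLoop]; simp only [dif_neg hne, if_neg hnum, if_pos hcap]
              rw [bLoop]; simp only [if_neg (by simp : ¬ (false = true)),
                if_neg hnum, if_pos hcap]
              rw [bLoop]
              obtain ⟨m1, m2, m3⟩ := alpha?_ne_markers hc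
              simp only [if_neg (by simp : ¬ (false = true)), if_neg m1, if_neg m2, if_neg m3]
              rw [hc]
              have h6' : ((rest.drop 6).drop 6).length % 6 = 0 := by
                simp [List.length_drop]; omega
              have hlt : ((rest.drop 6).drop 6).length < n := by
                simp [List.length_drop]; omega
              simpa using (ih _ hlt).1 ((rest.drop 6).drop 6)
                (out ++ [c.toUpper]) rfl h6' hv'
          · by_cases hsp : rest.take 6 = spaceC
            · rw [aLoop]; simp only [dif_neg hne, if_neg hnum, if_neg hcap, if_pos hsp]
              rw [bLoop]; simp only [if_neg (by simp : ¬ (false = true)),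
                if_neg hnum, if_neg hcap, if_pos hsp]
              have hv' : validM false (chunks6 (rest.drop 6)) = true := by
                rw [validM_false_cons] at hv; simpa [hnum, hcap, hsp] using hv
              have h6' : (rest.drop 6).length % 6 = 0 := by simp [List.length_drop]; omega
              have hlt : (rest.drop 6).length < n := by simp [List.length_drop]; omega
              exact (ih _ hlt).1 (rest.drop 6) (out ++ [' ']) rfl h6' hv'
            · -- plain letter
              rw [validM_false_cons] at hv
              simp only [if_neg hnum, if_neg hcap, if_neg hsp, Bool.and_eq_true] at hv
              obtain ⟨_, hv'⟩ := hv
              rw [aLoop]; simp only [dif_neg hne, if_neg hnum, if_neg hcap, if_neg hsp]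
              rw [bLoop]; simp only [if_neg (by simp : ¬ (false = true)),
                if_neg hnum, if_neg hcap, if_neg hsp]
              have h6' : (rest.drop 6).length % 6 = 0 := by simp [List.length_drop]; omega
              have hlt : (rest.drop 6).length < n := by simp [List.length_drop]; omega
              simpa using (ih _ hlt).1 (rest.drop 6)
                (out ++ [(alpha? (rest.take 6)).getD '?']) rfl h6' hv'
    · intro rest out hn h6 hv
      by_cases hne : rest = []
      · subst hne
        rw [chunks6]; simp [aDigits, aLoop, bLoop]
      · have hlen : rest.length ≠ 0 := by simpa using hne
        have hcons := chunks6_cons hne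
        rw [hcons] at hv ⊢
        rw [validM_true_cons] at hv
        by_cases hsp : rest.take 6 = spaceC
        · -- space ends the digit run: A breaks, outer loop then skips the space
          rw [aDigits]; simp only [dif_neg hne, if_pos hsp]
          rw [bLoop]; simp only [if_pos hsp]
          have hv' : validM false (chunks6 (rest.drop 6)) = true := by simpa [hsp] using hv
          have h6' : (rest.drop 6).length % 6 = 0 := by simp [List.length_drop]; omega
          have hlt : (rest.drop 6).length < n := by simp [List.length_drop]; omega
          exact (ih _ hlt).1 (rest.drop 6) (out ++ [' ']) rfl h6' hv'
        · -- digit chunk: both append the digit lookup and continue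
          rw [aDigits]; simp only [dif_neg hne, if_neg hsp]
          rw [bLoop]; simp only [if_neg hsp]
          have hv' : validM true (chunks6 (rest.drop 6)) = true := by
            simp only [if_neg hsp, Bool.and_eq_true] at hv; exact hv.2
          have h6' : (rest.drop 6).length % 6 = 0 := by simp [List.length_drop]; omega
          have hlt : (rest.drop 6).length < n := by simp [List.length_drop]; omega
          exact (ih _ hlt).2 (rest.drop 6) (out ++ [(digit? (rest.take 6)).getD '?']) rfl h6' hv'

-- ===== VERDICT (by name: the statement is the Claim_ definition above) =====
theorem convert_braille_to_english_spec : Claim_equal_convert_braille_to_english := by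
  intro s _hDom hPre
  unfold Spec_convert_braille_to_english convert_braille_to_english convert_braille_to_english_alt
  obtain ⟨h6, hv⟩ := hPre
  rw [preChunks_eq_chunks6 s.toList.length s.toList rfl h6] at hv
  exact congrArg String.ofList
    ((loops_agree s.toList.length).1 s.toList [] rfl h6 hv)
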